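-- pv_equiv track=rewrite | github.com/ProhibitedTV/ImageChoom | apps/gui/imagechoom/workflows.py | _extract_braced_block
-- ===== SOURCE A (Python) =====
-- def _extract_braced_block(text: str, start_index: int) -> str:
--     depth = 0
--     in_string = False
--     escaped = False
--     for index in range(start_index, len(text)):
--         char = text[index]
--         if in_string:
--             if escaped:
--                 escaped = False
--                 continue
--             if char == "\\":
--                 escaped = True
--             elif char == '"':
--                 in_string = False
--             continue
--
--         if char == '"':
--             in_string = True
--             continue
--
--         if char == "{":
--             depth += 1
--         elif char == "}":
--             depth -= 1
--             if depth == 0: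
--                 return text[start_index : index + 1]
--
--     return "{}"
-- ===== SOURCE B (Python) =====
-- def _extract_braced_block(text: str, start_index: int) -> str:
--     """Two-pass matcher: first lex the tail into the positions of braces that
--     lie outside string literals, then walk those brace tokens with a depth
--     counter; the block ends at the first '}' that brings the depth to zero."""
--     n = len(text)
--
--     # Pass 1: collect (position, brace) for every brace outside a string literal.
--     braces = []
--     i = start_index
--     while i < n:
--         c = text[i]
--         if c == '"':
--             i += 1
--             while i < n:
--                 if text[i] == "\\":
--                     i += 2
--                 elif text[i] == '"':
--                     i += 1
--                     break
--                 else: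
--                     i += 1
--         else:
--             if c in "{}":
--                 braces.append((i, c))
--             i += 1
--
--     # Pass 2: depth scan over the brace tokens only.
--     depth = 0
--     for pos, c in braces:
--         if c == "{":
--             depth += 1
--         else:
--             depth -= 1
--             if depth == 0:
--                 return text[start_index : pos + 1]
--     return "{}"
-- ===== Notes on version B (the rewrite author's own statement) =====
-- stated objective: alternative
-- what changed: A's single fused loop carrying depth/in_string/escaped state is replaced by two passes: a lexer that collects the positions of braces lying outside string literals, then a plain depth scan over just those brace tokens; Pre_ excludes only start_index < -len(text), where A raises IndexError (B raises there too).
import Mathlib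
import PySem

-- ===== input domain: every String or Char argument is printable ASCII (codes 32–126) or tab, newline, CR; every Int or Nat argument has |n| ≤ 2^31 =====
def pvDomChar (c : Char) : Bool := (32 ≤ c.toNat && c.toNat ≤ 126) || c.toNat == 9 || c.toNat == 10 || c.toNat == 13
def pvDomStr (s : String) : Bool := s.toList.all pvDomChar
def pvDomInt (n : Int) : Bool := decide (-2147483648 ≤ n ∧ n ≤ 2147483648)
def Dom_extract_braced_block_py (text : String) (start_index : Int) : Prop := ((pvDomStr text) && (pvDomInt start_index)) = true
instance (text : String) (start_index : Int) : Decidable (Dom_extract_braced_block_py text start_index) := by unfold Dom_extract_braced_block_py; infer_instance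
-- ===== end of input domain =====

-- B replaces A's fused depth/string/escape state machine by two passes: a lexer that
-- collects the positions of braces outside string literals, then a depth scan over
-- just those brace tokens — an alternative decomposition, similar cost.

-- Both Pythons read text[index] for index in range(start_index, len(text)), in order;
-- this shared helper materialises that traversal as (index, character) pairs. Inside
-- Pre_ every pyGet? is some (the ' ' default only makes the ports total).
def pvSeq (tl : List Char) (s : Int) : List (Int × Char) :=
  (PySem.List.pyRange s tl.length 1).map (fun i => (i, (PySem.List.pyGet? tl i).getD ' '))

-- ===== PORT A =====
-- A's for-loop, carrying (depth, in_string, escaped); 'some j' = the early return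
-- text[start_index : j + 1], 'none' = the loop fell off the end.
def pvALoop : List (Int × Char) → Int → Bool → Bool → Option Int
  | [], _, _, _ => none
  | (idx, c) :: rest, depth, instr, esc =>
    if instr then
      if esc then pvALoop rest depth true false
      else if c = '\\' then pvALoop rest depth true true
      else if c = '"' then pvALoop rest depth false false
      else pvALoop rest depth true false
    else if c = '"' then pvALoop rest depth true false
    else if c = '{' then pvALoop rest (depth + 1) false false
    else if c = '}' then
      if depth - 1 = 0 then some idx else pvALoop rest (depth - 1) false false
    else pvALoop rest depth false false

def extract_braced_block_py (text : String) (start_index : Int) : String :=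
  let tl := text.toList
  match pvALoop (pvSeq tl start_index) 0 false false with
  | some j => String.ofList (PySem.List.slice tl (some start_index) (some (j + 1)))
  | none => "{}"

-- ===== PORT B =====
-- Source B's inner string loop: just after an opening '"'; consumes up to and including
-- the closing '"' (a '\\' consumes two characters) and returns the rest.
def pvSkipString : List (Int × Char) → List (Int × Char)
  | [] => []
  | (_, c) :: r =>
    if c = '\\' then
      match r with
      | [] => []
      | _ :: r2 => pvSkipString r2
    else if c = '"' then r
    else pvSkipString r

-- termination helper for pvLex (cited by its decreasing_by)
theorem pvSkipString_len : ∀ (l : List (Int × Char)), (pvSkipString l).length ≤ l.length := by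
  intro l
  fun_induction pvSkipString l <;> simp_all <;> omega

-- Source B's pass 1: the (position, brace) tokens outside string literals.
def pvLex : List (Int × Char) → List (Int × Char)
  | [] => []
  | (i, c) :: r =>
    if c = '"' then pvLex (pvSkipString r)
    else if c = '{' ∨ c = '}' then (i, c) :: pvLex r
    else pvLex r
termination_by l => l.length
decreasing_by
  · have := pvSkipString_len r; simp; omega
  · simp
  · simp

-- Source B's pass 2: depth scan over the brace tokens.
def pvScan : List (Int × Char) → Int → Option Int
  | [], _ => none
  | (pos, c) :: r, depth =>
    if c = '{' then pvScan r (depth + 1)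
    else if depth - 1 = 0 then some pos else pvScan r (depth - 1)

def extract_braced_block_py_alt (text : String) (start_index : Int) : String :=
  let tl := text.toList
  match pvScan (pvLex (pvSeq tl start_index)) 0 with
  | some j => String.ofList (PySem.List.slice tl (some start_index) (some (j + 1)))
  | none => "{}"

-- ===== PRECONDITION & SPEC =====
-- Pre_ excludes exactly the inputs where A raises IndexError: start_index < -len(text)
-- makes the first text[start_index] access raise (both Pythons raise there).
def Pre_extract_braced_block_py (text : String) (start_index : Int) : Prop :=
  -(text.length : Int) ≤ start_index
instance (text : String) (start_index : Int) : Decidable (Pre_extract_braced_block_py text start_index) := by unfold Pre_extract_braced_block_py; infer_instance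

def pvWitness_extract_braced_block_py : String × Int := ("a {\"x}\": {1}} b", 2)

def Spec_extract_braced_block_py (text : String) (start_index : Int) (out : String) : Prop := out = extract_braced_block_py_alt text start_index
instance (text : String) (start_index : Int) (out : String) : Decidable (Spec_extract_braced_block_py text start_index out) := by unfold Spec_extract_braced_block_py; infer_instance

-- ===== CLAIM (what is proved, stated in full; the proofs are below) =====
def Claim_equal_extract_braced_block_py : Prop := ∀ (text : String) (start_index : Int), Dom_extract_braced_block_py text start_index → Pre_extract_braced_block_py text start_index → Spec_extract_braced_block_py text start_index (extract_braced_block_py text start_index)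

-- ===== LEMMAS AND PROOFS =====

-- A in string mode = skip the string literal, then A in normal mode
theorem pvLemS (l : List (Int × Char)) (d : Int) :
    pvALoop l d true false = pvALoop (pvSkipString l) d false false := by
  fun_induction pvSkipString l <;> simp_all [pvALoop]

-- A's fused loop = B's depth scan over the lexed brace tokens
theorem pvMain (l : List (Int × Char)) :
    ∀ d, pvALoop l d false false = pvScan (pvLex l) d := by
  fun_induction pvLex l with
  | case1 => intro d; simp [pvALoop, pvScan]
  | case2 i r ih =>
    intro d
    rw [show pvALoop ((i, '"') :: r) d false false = pvALoop r d true false from by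
      rw [pvALoop]; simp]
    rw [pvLemS]
    exact ih d
  | case3 i c r hq hb ih =>
    intro d
    rcases hb with hb | hb <;> subst hb
    · rw [show pvALoop ((i, '{') :: r) d false false = pvALoop r (d + 1) false false from by
        rw [pvALoop]; simp]
      rw [pvScan]
      simp only [reduceIte]
      exact ih (d + 1)
    · rw [show pvALoop ((i, '}') :: r) d false false =
          (if d - 1 = 0 then some i else pvALoop r (d - 1) false false) from by
        rw [pvALoop]; simp]
      rw [pvScan]
      simp only [if_neg (by decide : ¬ (('}' : Char) = '{'))]
      by_cases h0 : d - 1 = 0 <;> simp [h0, ih (d - 1)]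
  | case4 i c r hq hb ih =>
    intro d
    push Not at hb
    rw [show pvALoop ((i, c) :: r) d false false = pvALoop r d false false from by
      rw [pvALoop]; simp [hq, hb.1, hb.2]]
    exact ih d

-- ===== VERDICT (by name: the statement is the Claim_ definition above) =====
theorem extract_braced_block_py_spec : Claim_equal_extract_braced_block_py := by
  intro text s _ _
  unfold Spec_extract_braced_block_py
  simp only [extract_braced_block_py, extract_braced_block_py_alt, pvMain]
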